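-- pv_equiv track=rewrite | github.com/nigoshu-roby/openclaw-roby | scripts/roby-precision-eval.py | compute_gate
-- ===== SOURCE A (Python) =====
-- from typing import Any, Dict, List
--
-- def compute_gate(sections: List[Dict[str, Any]], issues: List[str]) -> str:
--     statuses = {str(section.get("status") or "") for section in sections}
--     if "fail" in statuses:
--         return "fail"
--     if "attention" in statuses or issues:
--         return "attention"
--     if "insufficient" in statuses:
--         return "insufficient"
--     return "ok"
-- ===== SOURCE B (Python) =====
-- def compute_gate(sections, issues):
--     def _sev(status):
--         if status == "fail":
--             return 3
--         if status == "attention":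
--             return 2
--         if status == "insufficient":
--             return 1
--         return 0
--
--     sev = 0
--     for section in sections:
--         sev = max(sev, _sev(str(section.get("status") or "")))
--     if issues:
--         sev = max(sev, 2)
--     return ("ok", "insufficient", "attention", "fail")[sev]
-- ===== Notes on version B (the rewrite author's own statement) =====
-- stated objective: alternative
-- what changed: Replaces the set-build plus ordered membership checks with a single pass computing the maximum severity rank (fail=3, attention=2, insufficient=1, other=0), bumping it to at least 2 when issues is non-empty, and mapping the rank back to a status string.
import Mathlib
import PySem

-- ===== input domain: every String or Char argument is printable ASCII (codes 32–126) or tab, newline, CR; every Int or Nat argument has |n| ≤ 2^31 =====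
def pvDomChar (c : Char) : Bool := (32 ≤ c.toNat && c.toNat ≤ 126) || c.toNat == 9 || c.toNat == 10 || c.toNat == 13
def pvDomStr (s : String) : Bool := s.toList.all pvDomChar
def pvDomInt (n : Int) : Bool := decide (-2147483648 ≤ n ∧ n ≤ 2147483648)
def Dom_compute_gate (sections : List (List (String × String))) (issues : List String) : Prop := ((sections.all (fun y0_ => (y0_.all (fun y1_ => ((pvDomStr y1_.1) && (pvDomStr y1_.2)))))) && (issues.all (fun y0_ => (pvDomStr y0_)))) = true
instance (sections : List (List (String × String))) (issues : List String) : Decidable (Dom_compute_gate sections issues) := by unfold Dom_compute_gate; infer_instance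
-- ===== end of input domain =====

-- B computes the same gate by a one-pass maximum-severity rank instead of building a status set and testing memberships in order (alternative decomposition, same cost).

-- ===== PORT A =====
-- shared subexpression str(section.get("status") or "") of both Pythons
def pyStatus (sec : List (String × String)) : String :=
  match sec.lookup "status" with
  | some s => if s == "" then "" else s
  | none => ""

def compute_gate (sections : List (List (String × String))) (issues : List String) : String :=
  let statuses : PySem.Set String := PySem.Set.ofList (sections.map pyStatus)
  if PySem.Set.contains statuses "fail" then "fail"
  else if PySem.Set.contains statuses "attention" || !issues.isEmpty then "attention"
  else if PySem.Set.contains statuses "insufficient" then "insufficient"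
  else "ok"

-- ===== PORT B =====
def sevOf (status : String) : Nat :=
  if status == "fail" then 3
  else if status == "attention" then 2
  else if status == "insufficient" then 1
  else 0

def compute_gate_alt (sections : List (List (String × String))) (issues : List String) : String :=
  let sev := sections.foldl (fun m sec => max m (sevOf (pyStatus sec))) 0
  let sev := if !issues.isEmpty then max sev 2 else sev
  match sev with
  | 3 => "fail"
  | 2 => "attention"
  | 1 => "insufficient"
  | _ => "ok"

-- ===== PRECONDITION & SPEC =====
def Spec_compute_gate (sections : List (List (String × String))) (issues : List String) (out : String) : Prop := out = compute_gate_alt sections issues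
instance (sections : List (List (String × String))) (issues : List String) (out : String) : Decidable (Spec_compute_gate sections issues out) := by unfold Spec_compute_gate; infer_instance

-- ===== CLAIM (what is proved, stated in full; the proofs are below) =====
def Claim_equal_compute_gate : Prop := ∀ (sections : List (List (String × String))) (issues : List String), Dom_compute_gate sections issues → Spec_compute_gate sections issues (compute_gate sections issues)

-- ===== LEMMAS AND PROOFS =====

-- max severity of a list of statuses, foldr form
def maxSev (l : List String) : Nat := l.foldr (fun s m => max (sevOf s) m) 0

theorem foldl_maxSev (l : List (List (String × String))) (a : Nat) :
    l.foldl (fun m sec => max m (sevOf (pyStatus sec))) a = max a (maxSev (l.map pyStatus)) := by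
  induction l generalizing a with
  | nil => simp [maxSev]
  | cons s t ih =>
    have h : maxSev (pyStatus s :: t.map pyStatus) = max (sevOf (pyStatus s)) (maxSev (t.map pyStatus)) := rfl
    simp only [List.foldl_cons, List.map_cons, ih, h, Nat.max_assoc]

theorem maxSev_chain (l : List String) :
    maxSev l = if "fail" ∈ l then 3 else if "attention" ∈ l then 2 else if "insufficient" ∈ l then 1 else 0 := by
  induction l with
  | nil => simp [maxSev]
  | cons s t ih =>
    have h : maxSev (s :: t) = max (sevOf s) (maxSev t) := rfl
    rw [h, ih]
    by_cases h1 : s = "fail"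
    · subst h1; simp only [sevOf, List.mem_cons, beq_iff_eq]; simp; split_ifs <;> omega
    · by_cases h2 : s = "attention"
      · subst h2; simp only [sevOf, List.mem_cons, beq_iff_eq]; simp; split_ifs <;> omega
      · by_cases h3 : s = "insufficient"
        · subst h3; simp only [sevOf, List.mem_cons, beq_iff_eq]; simp; split_ifs <;> omega
        · have n1 : ¬("fail" = s) := fun e => h1 e.symm
          have n2 : ¬("attention" = s) := fun e => h2 e.symm
          have n3 : ¬("insufficient" = s) := fun e => h3 e.symm
          simp [sevOf, h1, h2, h3, n1, n2, n3]

-- ===== VERDICT (by name: the statement is the Claim_ definition above) =====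
theorem compute_gate_spec : Claim_equal_compute_gate := by
  intro sections issues _
  unfold Spec_compute_gate compute_gate compute_gate_alt
  rw [foldl_maxSev, maxSev_chain]
  have c : ∀ x : String,
      (PySem.Set.contains (PySem.Set.ofList (sections.map pyStatus)) x = true)
        ↔ x ∈ sections.map pyStatus := by
    intro x; rw [PySem.Set.contains_iff, PySem.Set.mem_ofList]
  cases hi : issues.isEmpty <;> simp only [c] <;> simp <;>
    split_ifs <;> rfl
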